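-- pv_equiv track=rewrite | github.com/ChiaInnn/identifying_metaphors | evaluation.py | correct_positives
-- ===== SOURCE A (Python) =====
-- def correct_positives(result_nouns, gold_nouns):
--
-- 	correct_positives = 0
--
-- 	for result_dict in result_nouns:
-- 		for gold_dict in gold_nouns:
-- 			for resultid, result in result_dict.items():
-- 				for goldid, goldresult in gold_dict.items():
--
-- 					if resultid == goldid:
--
-- 						if (result == 'mrw') and (goldresult == 'mrw'):
-- 							correct_positives += 1
-- 	return correct_positives
-- ===== SOURCE B (Python) =====
-- def correct_positives(result_nouns, gold_nouns):
--     res_count = {}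
--     for d in result_nouns:
--         for i, v in d.items():
--             if v == 'mrw':
--                 res_count[i] = res_count.get(i, 0) + 1
--     gold_count = {}
--     for d in gold_nouns:
--         for i, v in d.items():
--             if v == 'mrw':
--                 gold_count[i] = gold_count.get(i, 0) + 1
--     total = 0
--     for i, n in res_count.items():
--         total += n * gold_count.get(i, 0)
--     return total
-- ===== Notes on version B (the rewrite author's own statement) =====
-- stated objective: faster
-- what changed: Replaces the four-deep nested scan over every result-dict/gold-dict item pair by two single passes that hash-count 'mrw' ids per side and a final sum of products of the counts per id.
import Mathlib
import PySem

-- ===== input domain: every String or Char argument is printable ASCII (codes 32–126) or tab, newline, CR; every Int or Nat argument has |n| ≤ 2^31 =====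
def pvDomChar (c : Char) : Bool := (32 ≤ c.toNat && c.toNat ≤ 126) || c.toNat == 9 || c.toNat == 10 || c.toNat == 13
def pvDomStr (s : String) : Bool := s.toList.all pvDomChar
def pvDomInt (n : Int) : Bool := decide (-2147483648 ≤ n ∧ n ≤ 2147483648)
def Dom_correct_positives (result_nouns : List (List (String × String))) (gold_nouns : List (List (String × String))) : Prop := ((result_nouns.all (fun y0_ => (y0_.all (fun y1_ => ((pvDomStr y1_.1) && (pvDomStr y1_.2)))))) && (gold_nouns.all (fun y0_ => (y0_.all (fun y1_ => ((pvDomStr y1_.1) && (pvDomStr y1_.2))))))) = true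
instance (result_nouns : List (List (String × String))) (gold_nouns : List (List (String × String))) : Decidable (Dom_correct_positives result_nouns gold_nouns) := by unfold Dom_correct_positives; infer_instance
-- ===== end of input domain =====

-- B replaces A's four-deep nested scan by per-side hash counters of 'mrw' ids and a
-- final sum of count products (objective: faster, asymptotically).

-- ===== PORT A =====
def correct_positives (result_nouns : List (List (String × String))) (gold_nouns : List (List (String × String))) : Int :=
  result_nouns.foldl (fun acc result_dict =>
    gold_nouns.foldl (fun acc gold_dict =>
      (PySem.Dict.ofList result_dict).items.foldl (fun acc rp =>
        (PySem.Dict.ofList gold_dict).items.foldl (fun acc gp =>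
          if rp.1 == gp.1 then
            (if rp.2 == "mrw" && gp.2 == "mrw" then acc + 1 else acc)
          else acc) acc) acc) acc) 0

-- ===== PORT B =====
-- helper of B: one pass over one side, counting 'mrw' occurrences per id
def cpMrwCounter (nouns : List (List (String × String))) : PySem.Dict String Int :=
  nouns.foldl (fun c d =>
    (PySem.Dict.ofList d).items.foldl (fun c p =>
      if p.2 == "mrw" then c.insert p.1 (c.getD p.1 0 + 1) else c) c) PySem.Dict.empty

def correct_positives_alt (result_nouns : List (List (String × String))) (gold_nouns : List (List (String × String))) : Int :=
  let rc := cpMrwCounter result_nouns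
  let gc := cpMrwCounter gold_nouns
  rc.items.foldl (fun total p => total + p.2 * gc.getD p.1 0) 0

-- ===== PRECONDITION & SPEC =====
def Spec_correct_positives (result_nouns : List (List (String × String))) (gold_nouns : List (List (String × String))) (out : Int) : Prop := out = correct_positives_alt result_nouns gold_nouns
instance (result_nouns : List (List (String × String))) (gold_nouns : List (List (String × String))) (out : Int) : Decidable (Spec_correct_positives result_nouns gold_nouns out) := by unfold Spec_correct_positives; infer_instance

-- ===== CLAIM (what is proved, stated in full; the proofs are below) =====
def Claim_equal_correct_positives : Prop := ∀ (result_nouns : List (List (String × String))) (gold_nouns : List (List (String × String))), Dom_correct_positives result_nouns gold_nouns → Spec_correct_positives result_nouns gold_nouns (correct_positives result_nouns gold_nouns)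

-- ===== LEMMAS AND PROOFS =====

-- the 'mrw' ids of one dict's items, and of a whole side
def idsOf (items : List (String × String)) : List String :=
  (items.filter (fun p => p.2 == "mrw")).map Prod.fst

def mrwAll (nouns : List (List (String × String))) : List String :=
  nouns.flatMap (fun d => idsOf (PySem.Dict.ofList d).items)

-- Σ_{r ∈ rs} (number of occurrences of r in gs)
def cnt (rs gs : List String) : Int :=
  (rs.map (fun r => (gs.count r : Int))).sum

lemma sum_map_add_int {α : Type} (d : List α) (g h : α → Int) :
    (d.map (fun k => g k + h k)).sum = (d.map g).sum + (d.map h).sum := by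
  induction d with
  | nil => simp
  | cons x t ih => simp [ih]; ring

lemma cnt_append_left (r1 r2 gs : List String) : cnt (r1 ++ r2) gs = cnt r1 gs + cnt r2 gs := by
  simp [cnt]

lemma cnt_append_right (rs g1 g2 : List String) : cnt rs (g1 ++ g2) = cnt rs g1 + cnt rs g2 := by
  simp only [cnt, List.count_append]
  rw [← sum_map_add_int]
  simp

-- A side: innermost loop
lemma lemA1 (gitems : List (String × String)) (rid rv : String) (acc : Int) :
    gitems.foldl (fun acc gp =>
      if rid == gp.1 then (if rv == "mrw" && gp.2 == "mrw" then acc + 1 else acc) else acc) acc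
    = acc + (if rv == "mrw" then ((idsOf gitems).count rid : Int) else 0) := by
  induction gitems generalizing acc with
  | nil => simp [idsOf]
  | cons p t ih =>
    simp only [List.foldl_cons, ih, idsOf, List.filter_cons]
    by_cases h1 : p.2 = "mrw" <;> by_cases h2 : rv = "mrw" <;> by_cases h3 : rid = p.1 <;>
      simp [h1, h2, h3, List.count_cons, beq_iff_eq] <;>
      first | ring | omega | (intro hh; exact h3 hh.symm)

-- A side: loop over result items (one dict pair)
lemma lemA2 (ritems gitems : List (String × String)) (acc : Int) :
    ritems.foldl (fun acc rp =>
      gitems.foldl (fun acc gp =>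
        if rp.1 == gp.1 then (if rp.2 == "mrw" && gp.2 == "mrw" then acc + 1 else acc) else acc) acc) acc
    = acc + cnt (idsOf ritems) (idsOf gitems) := by
  induction ritems generalizing acc with
  | nil => simp [cnt, idsOf]
  | cons p t ih =>
    rw [List.foldl_cons, ih, lemA1]
    by_cases h1 : p.2 = "mrw" <;> simp [h1, idsOf, List.filter_cons, cnt] <;> ring

-- A side: loop over gold dicts
lemma lemA3 (gold_nouns : List (List (String × String))) (rd : List (String × String)) (acc : Int) :
    gold_nouns.foldl (fun acc gold_dict =>
      (PySem.Dict.ofList rd).items.foldl (fun acc rp =>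
        (PySem.Dict.ofList gold_dict).items.foldl (fun acc gp =>
          if rp.1 == gp.1 then (if rp.2 == "mrw" && gp.2 == "mrw" then acc + 1 else acc) else acc) acc) acc) acc
    = acc + cnt (idsOf (PySem.Dict.ofList rd).items) (mrwAll gold_nouns) := by
  induction gold_nouns generalizing acc with
  | nil => simp [cnt, mrwAll]
  | cons g t ih =>
    rw [List.foldl_cons, ih, lemA2]
    simp only [mrwAll, List.flatMap_cons, cnt_append_right]
    ring

-- A characterised
lemma lemA0 (result_nouns gold_nouns : List (List (String × String))) (acc : Int) :
    result_nouns.foldl (fun acc result_dict =>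
      gold_nouns.foldl (fun acc gold_dict =>
        (PySem.Dict.ofList result_dict).items.foldl (fun acc rp =>
          (PySem.Dict.ofList gold_dict).items.foldl (fun acc gp =>
            if rp.1 == gp.1 then (if rp.2 == "mrw" && gp.2 == "mrw" then acc + 1 else acc) else acc) acc) acc) acc) acc
    = acc + cnt (mrwAll result_nouns) (mrwAll gold_nouns) := by
  induction result_nouns generalizing acc with
  | nil => simp [cnt, mrwAll]
  | cons r t ih =>
    rw [List.foldl_cons, ih, lemA3]
    simp only [mrwAll, List.flatMap_cons, cnt_append_left]
    ring

lemma lemA (result_nouns gold_nouns : List (List (String × String))) :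
    correct_positives result_nouns gold_nouns = cnt (mrwAll result_nouns) (mrwAll gold_nouns) := by
  have := lemA0 result_nouns gold_nouns 0
  unfold correct_positives
  simpa using this

-- B side: inner item loop builds the counter over idsOf
lemma lemB1 (items : List (String × String)) (c : PySem.Dict String Int) :
    items.foldl (fun c p => if p.2 == "mrw" then c.insert p.1 (c.getD p.1 0 + 1) else c) c
    = (idsOf items).foldl (fun c x => c.insert x (c.getD x 0 + 1)) c := by
  induction items generalizing c with
  | nil => simp [idsOf]
  | cons p t ih =>
    by_cases h : p.2 = "mrw"
    · rw [List.foldl_cons, if_pos (by simp [h]), ih]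
      simp [idsOf, List.filter_cons, h]
    · rw [List.foldl_cons, if_neg (by simp [h]), ih]
      simp [idsOf, List.filter_cons, h]

lemma lemB2 (nouns : List (List (String × String))) :
    cpMrwCounter nouns = PySem.Dict.counter (mrwAll nouns) := by
  rw [← PySem.Dict.foldl_insert_getD_add_one_eq_counter]
  unfold cpMrwCounter
  generalize PySem.Dict.empty = c
  induction nouns generalizing c with
  | nil => simp [mrwAll]
  | cons d t ih =>
    rw [List.foldl_cons, lemB1, ih]
    simp only [mrwAll, List.flatMap_cons, List.foldl_append]

lemma lemB3 (items : List (String × Int)) (gc : PySem.Dict String Int) (acc : Int) :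
    items.foldl (fun total p => total + p.2 * gc.getD p.1 0) acc
    = acc + (items.map (fun p => p.2 * gc.getD p.1 0)).sum := by
  induction items generalizing acc with
  | nil => simp
  | cons p t ih => simp [ih]; ring

-- regrouping: Σ over a list = Σ over its distinct elements weighted by multiplicity
lemma sum_single (f : String → Int) (x : String) (d : List String) (hd : d.Nodup) (hx : x ∈ d) :
    (d.map (fun k => if k = x then f k else 0)).sum = f x := by
  induction d with
  | nil => simp at hx
  | cons a t ih =>
    simp only [List.nodup_cons] at hd
    rcases List.mem_cons.mp hx with h | h
    · subst h
      have hmap : (t.map (fun k => if k = x then f k else 0)) = t.map (fun _ => (0 : Int)) := by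
        apply List.map_congr_left; intro y hy
        have hyx : y ≠ x := fun h' => hd.1 (h' ▸ hy)
        simp [hyx]
      simp [hmap]
    · have hax : a ≠ x := fun h' => hd.1 (h' ▸ h)
      simp [hax, ih hd.2 h]

lemma regroup (l d : List String) (f : String → Int) (hd : d.Nodup) (hsub : ∀ y ∈ l, y ∈ d) :
    (l.map f).sum = (d.map (fun k => (l.count k : Int) * f k)).sum := by
  induction l with
  | nil => simp
  | cons x t ih =>
    have hx : x ∈ d := hsub x (List.mem_cons_self ..)
    have ht : ∀ y ∈ t, y ∈ d := fun y hy => hsub y (List.mem_cons_of_mem _ hy)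
    have : (d.map (fun k => ((x :: t).count k : Int) * f k))
        = d.map (fun k => (t.count k : Int) * f k + (if k = x then f k else 0)) := by
      apply List.map_congr_left; intro k hk
      by_cases h : k = x
      · simp [List.count_cons, h, beq_iff_eq]; push_cast; ring
      · have h' : x ≠ k := fun hh => h hh.symm
        simp [List.count_cons, h, h', beq_iff_eq]
    rw [this, sum_map_add_int, ← ih ht, sum_single f x d hd hx]
    simp; ring

-- ===== VERDICT (by name: the statement is the Claim_ definition above) =====
theorem correct_positives_spec : Claim_equal_correct_positives := by
  intro result_nouns gold_nouns _
  unfold Spec_correct_positives correct_positives_alt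
  rw [lemA, lemB2, lemB2, lemB3, PySem.Dict.items_counter]
  simp only [List.map_map, Function.comp_def, PySem.Dict.getD_counter, cnt]
  rw [regroup (mrwAll result_nouns) (PySem.Set.ofList (mrwAll result_nouns))
      (fun r => ((mrwAll gold_nouns).count r : Int)) (PySem.Set.nodup_ofList _)
      (fun y hy => (PySem.Set.mem_ofList _ _).mpr hy)]
  simp [cnt]
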